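-- pv_equiv track=rewrite | github.com/teichbauer/p3sat3 | basics.py | get_setlst
-- ===== SOURCE A (Python) =====
-- def get_setlst(order, cdic):  # Complexity for order == 2: O(m**2)
--     ''' setlst_dic = {}  # {2: [{'C001','C002'},...], 3:[], ...}
--         -------------------------------------------------------------
--         fill a list in setlst_dic[order]. E.G. for order == 2
--         setlst_dic[2] will have [{'C001','C002'},...] and return this list
--         ----------------------------
--         '''
--     base = sorted(list(cdic.keys()))
--     setlst_dic = {}  # {2: [{'C001','C002'},...], 3:[], ...}
--     if order not in setlst_dic:
--         slst = setlst_dic.setdefault(order, [])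
--         if order == 2:
--             return fill_2set(base[:], slst)
--         else:
--             if (order - 1) not in setlst_dic:
--                 last_lst = get_setlst(order - 1, cdic)
--             else:
--                 last_lst = setlst_dic[order - 1]
--             for s in last_lst:
--                 for b in base:
--                     if b not in s:
--                         ss = s.copy()
--                         ss.add(b)
--                         if ss not in slst:
--                             slst.append(ss)
--     return setlst_dic[order]
--
-- def fill_2set(src, lst2):  # Complexity: O(m**2)
--     ''' used in get_setlst, for case order==2
--         src is a mutable list. should be a copy, to prevent side-effect
--         '''
--     if len(src) < 2:
--         return lst2
--     k1 = src.pop(0)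
--     for k in src:
--         kpair = [k1, k]
--         kset = set(kpair)
--         if kset not in lst2:
--             lst2.append(kset)
--     return fill_2set(src, lst2)
-- ===== SOURCE B (Python) =====
-- def get_setlst(order, cdic):
--     base = sorted(cdic.keys())
--     return [set(c) for c in _combos(base, order)]
--
-- def _combos(rest, need):
--     # all `need`-element combinations of rest, in lexicographic order, as sorted lists
--     if need == 0:
--         return [[]]
--     if len(rest) < need:
--         return []
--     head, tail = rest[0], rest[1:]
--     return [[head] + c for c in _combos(tail, need - 1)] + _combos(tail, need)
-- ===== Notes on version B (the rewrite author's own statement) =====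
-- stated objective: alternative
-- what changed: A builds the size-`order` subsets bottom-up level by level, extending every previous-level set by every key and deduplicating each candidate by scanning the growing output list; B generates each combination exactly once, in the same lexicographic order, by a direct recursive combination generator over the sorted keys, so all duplicate generation and dedup scans disappear.
import Mathlib
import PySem

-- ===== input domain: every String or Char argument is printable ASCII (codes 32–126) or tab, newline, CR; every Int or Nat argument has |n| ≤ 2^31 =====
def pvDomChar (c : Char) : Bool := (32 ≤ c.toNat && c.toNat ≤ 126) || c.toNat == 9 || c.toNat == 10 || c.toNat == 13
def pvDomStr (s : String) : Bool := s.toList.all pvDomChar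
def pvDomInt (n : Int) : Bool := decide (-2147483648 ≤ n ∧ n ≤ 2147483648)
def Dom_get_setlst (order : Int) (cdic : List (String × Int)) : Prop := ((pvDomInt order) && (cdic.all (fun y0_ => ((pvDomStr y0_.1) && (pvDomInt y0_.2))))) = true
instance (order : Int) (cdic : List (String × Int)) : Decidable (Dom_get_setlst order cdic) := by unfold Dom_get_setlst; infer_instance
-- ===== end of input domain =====

-- B replaces A's level-by-level build-and-dedup with a direct recursive combination
-- generator over the sorted keys: each subset is emitted exactly once, so no dedup scans.

-- ===== PORT A =====
-- fill_2set(src, lst2): pops the head, pairs it with every remaining key, dedups against lst2.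
def fill_2set : List String → List (PySem.Set String) → List (PySem.Set String)
  | [], lst2 => lst2          -- len(src) < 2
  | [_], lst2 => lst2         -- len(src) < 2
  | k1 :: rest, lst2 =>
      fill_2set rest
        (rest.foldl (fun acc k =>
          let kset : PySem.Set String := PySem.Set.ofList [k1, k]
          if acc.any (fun t => PySem.Set.equal t kset) then acc else acc ++ [kset]) lst2)

-- get_setlst's recursion on order. setlst_dic is a fresh local dict in every Python call, so
-- 'order not in setlst_dic' is always true, slst = setdefault(order, []) starts [], and
-- '(order - 1) not in setlst_dic' always takes the recursive-call branch; fuel counts the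
-- Python recursion depth order-2 (for order < 2 the Python recurses without bound, outside Pre_).
def get_setlst_rec (fuel : Nat) (order : Int) (base : List String) : List (PySem.Set String) :=
  if order == 2 then fill_2set base []
  else
    match fuel with
    | 0 => []   -- unreachable for order ≥ 2
    | fuel' + 1 =>
      let last_lst := get_setlst_rec fuel' (order - 1) base
      last_lst.foldl (fun slst s =>
        base.foldl (fun slst b =>
          if PySem.Set.contains s b then slst
          else
            let ss := PySem.Set.add s b
            if slst.any (fun t => PySem.Set.equal t ss) then slst else slst ++ [ss]) slst) []

def get_setlst (order : Int) (cdic : List (String × Int)) : List (List String) :=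
  let base := PySem.List.sorted (PySem.Dict.keys (PySem.Dict.ofList cdic)) (fun x => x) false
  get_setlst_rec (order - 2).toNat order base

-- ===== PORT B =====
-- _combos(rest, need): all need-element combinations of rest in lexicographic order.
def pvCombos : List String → Int → List (List String)
  | [], need => if need == 0 then [[]] else []
      -- Python: need == 0 → [[]]; 0 = len(rest) < need → []; for need < 0 Source B raises
      -- IndexError on rest[0] (unreachable under Pre_), the port returns [] there
  | head :: tail, need =>
      if need == 0 then [[]]
      else if ((head :: tail).length : Int) < need then []
      else (pvCombos tail (need - 1)).map (fun c => head :: c) ++ pvCombos tail need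

def get_setlst_alt (order : Int) (cdic : List (String × Int)) : List (List String) :=
  let base := PySem.List.sorted (PySem.Dict.keys (PySem.Dict.ofList cdic)) (fun x => x) false
  (pvCombos base order).map (fun c => PySem.Set.ofList c)

-- ===== PRECONDITION & SPEC =====
-- Pre_ excludes exactly order < 2, where Python A's recursion on order-1 has no base case
-- and raises RecursionError (it returns no value there).
def Pre_get_setlst (order : Int) (cdic : List (String × Int)) : Prop :=
  2 ≤ order
instance (order : Int) (cdic : List (String × Int)) : Decidable (Pre_get_setlst order cdic) := by
  unfold Pre_get_setlst; infer_instance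

def pvWitness_get_setlst : Int × (List (String × Int)) := (2, [("b", 1), ("a", 2)])

def Spec_get_setlst (order : Int) (cdic : List (String × Int)) (out : List (List String)) : Prop :=
  out = get_setlst_alt order cdic
instance (order : Int) (cdic : List (String × Int)) (out : List (List String)) :
    Decidable (Spec_get_setlst order cdic out) := by unfold Spec_get_setlst; infer_instance

-- ===== CLAIM (what is proved, stated in full; the proofs are below) =====
def Claim_equal_get_setlst : Prop := ∀ (order : Int) (cdic : List (String × Int)),
  Dom_get_setlst order cdic → Pre_get_setlst order cdic →
  Spec_get_setlst order cdic (get_setlst order cdic)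

-- ===== LEMMAS AND PROOFS =====

-- the proof-side model: all k-element combinations of l in lexicographic order, as sorted lists
def combs : Nat → List String → List (List String)
  | 0, _ => [[]]
  | _ + 1, [] => []
  | k + 1, x :: xs => (combs k xs).map (fun c => x :: c) ++ combs (k + 1) xs

-- the one-step extension A's inner double loop computes for one set s (keys greater than all of s)
def ext (l : List String) (s : List String) : List (List String) :=
  (l.filter (fun b => s.all (fun a => decide (a < b)))).map (fun b => s ++ [b])

theorem pairwise_pair {a b : String} (h : a < b) : ([a, b] : List String).Pairwise (· < ·) :=
  List.pairwise_cons.mpr ⟨fun y hy => by rw [List.mem_singleton] at hy; subst hy; exact h,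
    List.pairwise_singleton _ _⟩

theorem mem_combs {k : Nat} {l c : List String} :
    c ∈ combs k l ↔ c.Sublist l ∧ c.length = k := by
  induction l generalizing k c with
  | nil =>
    cases k with
    | zero => simp [combs, List.sublist_nil]
    | succ k =>
      simp only [combs, List.not_mem_nil, false_iff, not_and]
      intro hs; simp [List.sublist_nil.mp hs]
  | cons x xs ih =>
    cases k with
    | zero =>
      constructor
      · rintro h; simp [combs] at h; simp [h, List.nil_sublist]
      · rintro ⟨hs, hl⟩; rw [List.length_eq_zero_iff] at hl; simp [combs, hl]
    | succ k =>
      simp only [combs, List.mem_append, List.mem_map]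
      constructor
      · rintro (⟨c', hc', rfl⟩ | h)
        · obtain ⟨h1, h2⟩ := ih.mp hc'
          exact ⟨List.Sublist.cons₂ x h1, by simp [h2]⟩
        · obtain ⟨h1, h2⟩ := ih.mp h
          exact ⟨h1.cons x, h2⟩
      · rintro ⟨hs, hl⟩
        cases c with
        | nil => simp at hl
        | cons y c' =>
          rcases List.cons_sublist_cons'.mp hs with h | ⟨rfl, h⟩
          · right; exact ih.mpr ⟨h, hl⟩
          · left; exact ⟨c', ih.mpr ⟨h, by simpa using hl⟩, rfl⟩

theorem combs_eq_nil_of_short {k : Nat} {l : List String} (h : l.length < k) :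
    combs k l = [] := by
  cases hc : combs k l with
  | nil => rfl
  | cons c t =>
    have : c ∈ combs k l := by rw [hc]; exact List.mem_cons_self
    obtain ⟨hs, hl⟩ := mem_combs.mp this
    have := hs.length_le
    omega

theorem combs_one (l : List String) : combs 1 l = l.map (fun b => [b]) := by
  induction l with
  | nil => rfl
  | cons x xs ih => simp [combs, ih]

theorem sorted_of_mem_combs {k : Nat} {l c : List String}
    (hl : l.Pairwise (· < ·)) (hc : c ∈ combs k l) : c.Pairwise (· < ·) :=
  List.Pairwise.sublist (mem_combs.mp hc).1 hl

theorem subset_of_mem_combs {k : Nat} {l c : List String}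
    (hc : c ∈ combs k l) : ∀ a ∈ c, a ∈ l :=
  fun _ ha => (mem_combs.mp hc).1.mem ha

theorem nodup_combs {k : Nat} {l : List String} (hl : l.Nodup) :
    (combs k l).Nodup := by
  induction l generalizing k with
  | nil => cases k <;> simp [combs]
  | cons x xs ih =>
    cases k with
    | zero => simp [combs]
    | succ k =>
      have hx : x ∉ xs := (List.nodup_cons.mp hl).1
      have hxs : xs.Nodup := (List.nodup_cons.mp hl).2
      rw [combs, List.nodup_append]
      refine ⟨(ih hxs).map (fun a b h => by injection h), ih hxs, ?_⟩
      intro c hc1 d hd1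
      simp only [List.mem_map] at hc1
      obtain ⟨c', _, rfl⟩ := hc1
      intro heq
      subst heq
      exact hx (subset_of_mem_combs hd1 x List.mem_cons_self)

-- a sorted list of members of a sorted list is a sublist of it
theorem sublist_of_sorted_subset {c l : List String}
    (hc : c.Pairwise (· < ·)) (hl : l.Pairwise (· < ·)) (hm : ∀ a ∈ c, a ∈ l) :
    c.Sublist l := by
  induction l generalizing c with
  | nil => cases c with
    | nil => exact List.Sublist.refl _
    | cons y c' => exact absurd (hm y List.mem_cons_self) (List.not_mem_nil)
  | cons x xs ih =>
    cases c with
    | nil => exact List.nil_sublist _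
    | cons y c' =>
      have hxxs := List.pairwise_cons.mp hl
      by_cases hyx : y = x
      · subst hyx
        refine List.Sublist.cons₂ y (ih (List.pairwise_cons.mp hc).2 hxxs.2 ?_)
        intro a ha
        have : a ∈ y :: xs := hm a (List.mem_cons_of_mem _ ha)
        rcases List.mem_cons.mp this with rfl | h
        · exact absurd ((List.pairwise_cons.mp hc).1 a ha) (lt_irrefl a)
        · exact h
      · have hy : y ∈ xs := by
          rcases List.mem_cons.mp (hm y List.mem_cons_self) with h | h
          · exact absurd h hyx
          · exact h
        refine List.Sublist.cons x (ih hc hxxs.2 ?_)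
        intro a ha
        rcases List.mem_cons.mp (hm a ha) with rfl | h
        · -- a = x but a ∈ y::c' with y ∈ xs, all > x: contradiction
          rcases List.mem_cons.mp ha with rfl | h'
          · exact absurd hy (by intro hc'; exact absurd (hxxs.1 _ hc') (lt_irrefl a))
          · have hya : y < a := (List.pairwise_cons.mp hc).1 a h'
            have : a < y := hxxs.1 y hy
            exact absurd (lt_trans hya this) (lt_irrefl y)
        · exact h

-- Set.equal on strictly sorted lists is list equality
theorem set_equal_iff_eq {c d : List String}
    (hc : c.Pairwise (· < ·)) (hd : d.Pairwise (· < ·)) :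
    PySem.Set.equal c d = true ↔ c = d := by
  constructor
  · intro h
    have hmem := (PySem.Set.equal_iff _ _).mp h
    have hcn : c.Nodup := hc.imp (fun h => ne_of_lt h)
    have hdn : d.Nodup := hd.imp (fun h => ne_of_lt h)
    have hperm : c.Perm d := (List.perm_ext_iff_of_nodup hcn hdn).mpr hmem
    exact List.Perm.eq_of_pairwise (fun a b _ _ h1 h2 => absurd h2 (not_lt.mpr (le_of_lt h1))) hc hd hperm
  · rintro rfl
    exact (PySem.Set.equal_iff _ _).mpr (fun x => Iff.rfl)

theorem pairwise_lex_combs {k : Nat} {l : List String} (hl : l.Pairwise (· < ·)) :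
    (combs k l).Pairwise (List.Lex (· < ·)) := by
  induction l generalizing k with
  | nil => cases k <;> simp [combs]
  | cons x xs ih =>
    cases k with
    | zero => simp [combs]
    | succ k =>
      have hxxs := List.pairwise_cons.mp hl
      rw [combs, List.pairwise_append]
      refine ⟨List.Pairwise.map _ (fun {a b} h => List.Lex.cons h) (ih hxxs.2), ih hxxs.2, ?_⟩
      rintro c hc1 d hd1
      simp only [List.mem_map] at hc1
      obtain ⟨c', _, rfl⟩ := hc1
      cases d with
      | nil =>
        have := (mem_combs.mp hd1).2; simp at this
      | cons y d' =>
        have hy : y ∈ xs := subset_of_mem_combs hd1 y List.mem_cons_self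
        exact List.Lex.rel (hxxs.1 y hy)

theorem lex_asymm {c d : List String} (h1 : List.Lex (· < ·) c d) :
    ¬ List.Lex (· < ·) d c := by
  induction h1 with
  | nil => intro h; cases h
  | @cons a l1 l2 _ ih =>
    intro h
    cases h with
    | cons h' => exact ih h'
    | rel h' => exact absurd h' (lt_irrefl a)
  | @rel a b l1 l2 hab =>
    intro h
    cases h with
    | cons h' => exact absurd hab (lt_irrefl a)
    | rel h' => exact absurd hab (lt_asymm h')

-- inserting b (smaller than some member) into sorted s and dropping the last element
-- yields a lexicographically smaller list
theorem lex_orderedInsert_dropLast {s : List String} {b : String}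
    (hs : s.Pairwise (· < ·)) (hb : b ∉ s) (ha : ∃ a ∈ s, b < a) :
    List.Lex (· < ·) ((s.orderedInsert (· ≤ ·) b).dropLast) s := by
  induction s with
  | nil => obtain ⟨a, ha', _⟩ := ha; exact absurd ha' (List.not_mem_nil)
  | cons c s' ih =>
    by_cases hbc : b ≤ c
    · have hbc' : b < c := lt_of_le_of_ne hbc (fun h => hb (h ▸ List.mem_cons_self))
      rw [List.orderedInsert]
      simp only [if_pos hbc]
      rw [List.dropLast_cons_of_ne_nil (by simp)]
      exact List.Lex.rel hbc'
    · rw [not_le] at hbc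
      rw [List.orderedInsert]
      simp only [if_neg (not_le.mpr hbc)]
      obtain ⟨a, ha', hba⟩ := ha
      have ha'' : a ∈ s' := by
        rcases List.mem_cons.mp ha' with rfl | h
        · exact absurd hba (lt_asymm hbc)
        · exact h
      have hne : s'.orderedInsert (· ≤ ·) b ≠ [] := by
        intro h
        have hlen := List.orderedInsert_length (· ≤ ·) s' b
        rw [h] at hlen
        simp at hlen
      rw [List.dropLast_cons_of_ne_nil hne]
      exact List.Lex.cons (ih (List.pairwise_cons.mp hs).2
        (fun h => hb (List.mem_cons_of_mem _ h)) ⟨a, ha'', hba⟩)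

-- the flatMap identity: extending every k-combination by its admissible larger keys
-- enumerates exactly the (k+1)-combinations, in order
theorem flatMap_ext_combs {l : List String} (hl : l.Pairwise (· < ·)) (k : Nat) :
    (combs k l).flatMap (ext l) = combs (k + 1) l := by
  induction l generalizing k with
  | nil => cases k <;> simp [combs, ext]
  | cons x xs ih =>
    have hxxs := List.pairwise_cons.mp hl
    cases k with
    | zero =>
      simp only [combs, List.flatMap_cons, List.flatMap_nil, List.append_nil, ext]
      simp only [List.all_nil, List.filter_true]
      rw [combs_one]
      simp
    | succ k =>
      rw [combs, List.flatMap_append, List.flatMap_map]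
      have part1 : (combs k xs).flatMap (fun c => ext (x :: xs) (x :: c)) =
          ((combs k xs).flatMap (ext xs)).map (fun c => x :: c) := by
        rw [List.map_flatMap]
        apply List.flatMap_congr  -- pointwise
        intro c hc
        have hcx : ∀ a ∈ c, x < a := fun a hac => hxxs.1 a (subset_of_mem_combs hc a hac)
        unfold ext
        rw [List.filter_cons]
        have hx : ((x :: c).all (fun a => decide (a < x))) = false := by
          simp
        rw [if_neg (by simp)]
        have hfeq : xs.filter (fun b => (x :: c).all (fun a => decide (a < b))) =
            xs.filter (fun b => c.all (fun a => decide (a < b))) := by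
          apply List.filter_congr
          intro b hb
          simp only [List.all_cons]
          rw [decide_eq_true (hxxs.1 b hb), Bool.true_and]
        rw [hfeq, List.map_map]
        rfl
      have part2 : (combs (k + 1) xs).flatMap (ext (x :: xs)) =
          (combs (k + 1) xs).flatMap (ext xs) := by
        apply List.flatMap_congr
        intro c hc
        have hlen := (mem_combs.mp hc).2
        unfold ext
        rw [List.filter_cons]
        rw [if_neg ?_]
        · cases c with
          | nil => simp at hlen
          | cons y c' =>
            have hy : y ∈ xs := subset_of_mem_combs hc y List.mem_cons_self
            simp only [List.all_cons, Bool.and_eq_true, decide_eq_true_eq, not_and]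
            intro h
            exact absurd h (lt_asymm (hxxs.1 y hy))
      rw [part1, part2, ih hxxs.2, ih hxxs.2, combs]

-- ---------- fill_2set = combs 2 ----------

theorem fill2_inner {k1 : String} {rest : List String} {acc : List (PySem.Set String)}
    (hsorted : (k1 :: rest).Pairwise (· < ·))
    (hacc : ∀ t ∈ acc, ∀ k ∈ rest, ¬ (PySem.Set.equal t (PySem.Set.ofList [k1, k]) = true)) :
    rest.foldl (fun acc k =>
        let kset : PySem.Set String := PySem.Set.ofList [k1, k]
        if acc.any (fun t => PySem.Set.equal t kset) then acc else acc ++ [kset]) acc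
      = acc ++ rest.map (fun k => [k1, k]) := by
  induction rest generalizing acc with
  | nil => simp
  | cons k rest' ih =>
    have hk1k : k1 < k := (List.pairwise_cons.mp hsorted).1 k List.mem_cons_self
    have hofl : PySem.Set.ofList [k1, k] = [k1, k] := by
      apply PySem.Set.ofList_eq_self_of_nodup
      simp [ne_of_lt hk1k]
    rw [List.foldl_cons]
    have hany : (acc.any (fun t => PySem.Set.equal t (PySem.Set.ofList [k1, k]))) = false := by
      rw [List.any_eq_false]
      intro t ht
      simpa using hacc t ht k List.mem_cons_self
    simp only [hany, if_neg Bool.false_ne_true]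
    have hsorted' : (k1 :: rest').Pairwise (· < ·) := by
      have h1 := List.pairwise_cons.mp hsorted
      have h2 := List.pairwise_cons.mp h1.2
      exact List.pairwise_cons.mpr ⟨fun a ha => h1.1 a (List.mem_cons_of_mem _ ha), h2.2⟩
    rw [ih hsorted' ?_]
    · rw [hofl]; simp
    · intro t ht k' hk'
      rcases List.mem_append.mp ht with h | h
      · exact hacc t h k' (List.mem_cons_of_mem _ hk')
      · -- t = [k1, k]; equal to [k1,k'] would force k = k'
        rw [List.mem_singleton] at h
        subst h
        rw [hofl]
        have hk'sorted : k < k' := (List.pairwise_cons.mp (List.pairwise_cons.mp hsorted).2).1 k' hk'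
        have hofl' : PySem.Set.ofList [k1, k'] = [k1, k'] := by
          apply PySem.Set.ofList_eq_self_of_nodup
          simp [ne_of_lt (lt_trans hk1k hk'sorted)]
        rw [hofl']
        intro heq
        have := (set_equal_iff_eq (pairwise_pair hk1k) (pairwise_pair (lt_trans hk1k hk'sorted))).mp heq
        injection this with _ h2
        injection h2 with h3
        exact absurd h3 (ne_of_lt hk'sorted)

theorem fill_2set_eq {src : List String} (hs : src.Pairwise (· < ·)) :
    ∀ acc : List (PySem.Set String),
      (∀ t ∈ acc, ∃ a, a ∈ t ∧ ∀ c ∈ src, a < c) →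
      fill_2set src acc = acc ++ combs 2 src := by
  induction src with
  | nil => intro acc _; simp [fill_2set, combs]
  | cons k1 rest ih =>
    intro acc hacc
    cases rest with
    | nil => simp [fill_2set, combs]
    | cons k2 rest' =>
      rw [fill_2set]
      have hsorted := hs
      have hrest_sorted : (k2 :: rest').Pairwise (· < ·) := (List.pairwise_cons.mp hs).2
      have hk1lt : ∀ c ∈ k2 :: rest', k1 < c := (List.pairwise_cons.mp hs).1
      rw [fill2_inner hsorted ?hacc2]
      case hacc2 =>
        intro t ht k hk heq
        obtain ⟨a, hat, halt⟩ := hacc t ht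
        have hofl : PySem.Set.ofList [k1, k] = [k1, k] := by
          apply PySem.Set.ofList_eq_self_of_nodup
          simp [ne_of_lt (hk1lt k hk)]
        rw [hofl] at heq
        have hmem := (PySem.Set.equal_iff _ _).mp heq a
        have hmem2 : a ∈ ([k1, k] : List String) := hmem.mp hat
        have hak1 : a < k1 := halt k1 List.mem_cons_self
        rcases List.mem_cons.mp hmem2 with h | h
        · exact absurd (h ▸ hak1) (lt_irrefl k1)
        · rw [List.mem_singleton] at h
          subst h
          exact absurd (halt a (List.mem_cons_of_mem _ hk)) (lt_irrefl a)
      rw [ih hrest_sorted _ ?hacc3]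
      case hacc3 =>
        intro t ht
        rcases List.mem_append.mp ht with h | h
        · obtain ⟨a, hat, halt⟩ := hacc t h
          exact ⟨a, hat, fun c hc => halt c (List.mem_cons_of_mem _ hc)⟩
        · simp only [List.mem_map] at h
          obtain ⟨k, hk, rfl⟩ := h
          exact ⟨k1, List.mem_cons_self, hk1lt⟩
      rw [List.append_assoc]
      congr 1
      have : combs 2 (k1 :: k2 :: rest') =
          (combs 1 (k2 :: rest')).map (fun c => k1 :: c) ++ combs 2 (k2 :: rest') := rfl
      rw [this, combs_one, List.map_map]
      rfl
      simp

-- ---------- A's dedup step = ext, level by level ----------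

theorem innerA_aux {base s : List String} {k : Nat}
    (hbase : base.Pairwise (· < ·))
    {C rest : List (List String)}
    (hL : combs k base = C ++ s :: rest) :
    ∀ (p q : List String), base = p ++ q →
    q.foldl (fun slst b =>
        if PySem.Set.contains s b then slst
        else
          let ss := PySem.Set.add s b
          if slst.any (fun t => PySem.Set.equal t ss) then slst else slst ++ [ss])
      (C.flatMap (ext base) ++
        (p.filter (fun b => s.all (fun a => decide (a < b)))).map (fun b => s ++ [b]))
      = C.flatMap (ext base) ++ ext base s := by
  have hbnodup : base.Nodup := hbase.imp (fun h => ne_of_lt h)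
  have hsmem : s ∈ combs k base := by rw [hL]; exact List.mem_append_right _ List.mem_cons_self
  have hssorted : s.Pairwise (· < ·) := sorted_of_mem_combs hbase hsmem
  have hsnodup : s.Nodup := hssorted.imp (fun h => ne_of_lt h)
  have hslen : s.length = k := (mem_combs.mp hsmem).2
  have hssub : ∀ a ∈ s, a ∈ base := subset_of_mem_combs hsmem
  intro p q
  induction q generalizing p with
  | nil =>
    intro hpq
    rw [List.foldl_nil, hpq, List.append_nil]
    rfl
  | cons b q' ihq =>
    intro hpq
    have hbmem : b ∈ base := by rw [hpq]; exact List.mem_append_right _ List.mem_cons_self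
    rw [List.foldl_cons]
    by_cases hbin : b ∈ s
    · -- b in s: Python skips; the filter also drops b
      rw [if_pos ((PySem.Set.contains_iff _ _).mpr hbin)]
      have hfb : (s.all (fun a => decide (a < b))) = false := by
        rw [List.all_eq_false]
        exact ⟨b, hbin, by simp⟩
      have hstep : (p ++ [b]).filter (fun b => s.all (fun a => decide (a < b)))
          = p.filter (fun b => s.all (fun a => decide (a < b))) := by
        rw [List.filter_append, List.filter_cons, hfb]
        simp
      have := ihq (p ++ [b]) (by rw [hpq]; simp)
      rw [hstep] at this
      exact this
    · rw [if_neg (by rw [PySem.Set.contains_iff]; exact hbin)]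
      have hadd : PySem.Set.add s b = s ++ [b] := PySem.Set.add_of_not_mem hbin
      by_cases hall : (s.all (fun a => decide (a < b))) = true
      · -- b is larger than everything in s: a NEW set is appended
        have hsssorted : (s ++ [b]).Pairwise (· < ·) := by
          rw [List.pairwise_append]
          refine ⟨hssorted, List.pairwise_singleton _ _, ?_⟩
          intro a ha x hx
          rw [List.mem_singleton] at hx; subst hx
          simpa using (List.all_eq_true.mp hall) a ha
        -- decompose ext base s around b
        have hext : ext base s =
            (p.filter (fun b => s.all (fun a => decide (a < b)))).map (fun b => s ++ [b])
            ++ (s ++ [b]) :: (q'.filter (fun b => s.all (fun a => decide (a < b)))).map (fun b => s ++ [b]) := by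
          unfold ext
          rw [hpq, List.filter_append, List.filter_cons, hall]
          simp
        -- the full combination list is nodup, and acc ++ [s++[b]] is a prefix of it
        have hfull : (combs k base).flatMap (ext base) = combs (k + 1) base :=
          flatMap_ext_combs hbase k
        have hnodupfull : (combs (k + 1) base).Nodup := nodup_combs hbnodup
        have hdecomp : combs (k + 1) base =
            (C.flatMap (ext base) ++
              (p.filter (fun b => s.all (fun a => decide (a < b)))).map (fun b => s ++ [b]))
            ++ (s ++ [b]) :: ((q'.filter (fun b => s.all (fun a => decide (a < b)))).map (fun b => s ++ [b])
                ++ rest.flatMap (ext base)) := by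
          rw [← hfull, hL, List.flatMap_append, List.flatMap_cons, hext]
          simp
        have hnotmem : (s ++ [b]) ∉
            (C.flatMap (ext base) ++
              (p.filter (fun b => s.all (fun a => decide (a < b)))).map (fun b => s ++ [b])) := by
          have := hnodupfull
          rw [hdecomp, List.nodup_append] at this
          intro hmem
          exact this.2.2 _ hmem _ List.mem_cons_self rfl
        have hmemfull : ∀ t ∈ (C.flatMap (ext base) ++
              (p.filter (fun b => s.all (fun a => decide (a < b)))).map (fun b => s ++ [b])),
            t ∈ combs (k + 1) base := by
          intro t ht
          rw [hdecomp]
          exact List.mem_append_left _ ht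
        have hany : ((C.flatMap (ext base) ++
              (p.filter (fun b => s.all (fun a => decide (a < b)))).map (fun b => s ++ [b])).any
              (fun t => PySem.Set.equal t (s ++ [b]))) = false := by
          rw [List.any_eq_false]
          intro t ht heq
          have htsorted : t.Pairwise (· < ·) := sorted_of_mem_combs hbase (hmemfull t ht)
          have := (set_equal_iff_eq htsorted hsssorted).mp heq
          subst this
          exact hnotmem ht
        rw [hadd]
        simp only [hany, if_neg Bool.false_ne_true]
        have hstep : ((p ++ [b]).filter (fun b => s.all (fun a => decide (a < b)))).map (fun b => s ++ [b])
            = (p.filter (fun b => s.all (fun a => decide (a < b)))).map (fun b => s ++ [b]) ++ [s ++ [b]] := by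
          rw [List.filter_append, List.filter_cons, hall]
          simp
        have := ihq (p ++ [b]) (by rw [hpq]; simp)
        rw [hstep, ← List.append_assoc] at this
        exact this
      · -- b is smaller than some member of s: the set s ∪ {b} was already produced earlier
        have hall' : (s.all (fun a => decide (a < b))) = false := by
          cases h : s.all (fun a => decide (a < b)) with
          | false => rfl
          | true => exact absurd h hall
        obtain ⟨a, ha, hnab⟩ := List.all_eq_false.mp hall'
        have hba : b < a := by
          rcases lt_trichotomy a b with h | h | h
          · exact absurd (decide_eq_true h) hnab
          · exact absurd (h ▸ ha) hbin
          · exact h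
        -- the sorted version of s ∪ {b}
        set t := s.orderedInsert (· ≤ ·) b with htdef
        have htperm : t.Perm (b :: s) := List.perm_orderedInsert _ _ _
        have htnodup : t.Nodup := htperm.nodup_iff.mpr (List.nodup_cons.mpr ⟨hbin, hsnodup⟩)
        have htsorted : t.Pairwise (· < ·) := by
          have h1 : t.Pairwise (· ≤ ·) :=
            List.Pairwise.orderedInsert b s (hssorted.imp (fun h => le_of_lt h))
          exact (h1.and htnodup).imp (fun h => lt_of_le_of_ne h.1 h.2)
        have htlen : t.length = k + 1 := by
          rw [htdef, List.orderedInsert_length, hslen]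
        have htmem : t ∈ combs (k + 1) base := by
          apply mem_combs.mpr
          refine ⟨sublist_of_sorted_subset htsorted hbase ?_, htlen⟩
          intro x hx
          rcases (List.mem_orderedInsert _).mp hx with rfl | hx'
          · exact hbmem
          · exact hssub x hx'
        have htmemb : b ∈ t := (List.mem_orderedInsert _).mpr (Or.inl rfl)
        -- t is not among the extensions of s
        have htne_ext : t ∉ ext base s := by
          intro hmem
          unfold ext at hmem
          rw [List.mem_map] at hmem
          obtain ⟨x, hxf, hxe⟩ := hmem
          have hbx : b ∈ s ++ [x] := by rw [hxe]; exact htmemb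
          rcases List.mem_append.mp hbx with h | h
          · exact hbin h
          · rw [List.mem_singleton] at h
            subst h
            exact absurd (List.of_mem_filter hxf) (by rw [hall']; simp)
        -- t is not among the extensions of later sets
        have htne_rest : t ∉ rest.flatMap (ext base) := by
          intro hmem
          rw [List.mem_flatMap] at hmem
          obtain ⟨s'', hs'', hts''⟩ := hmem
          unfold ext at hts''
          rw [List.mem_map] at hts''
          obtain ⟨x, _, hxe⟩ := hts''
          have hdrop : t.dropLast = s'' := by rw [← hxe, List.dropLast_concat]
          have hlex1 : List.Lex (· < ·) s'' s := by
            rw [← hdrop, htdef]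
            exact lex_orderedInsert_dropLast hssorted hbin ⟨a, ha, hba⟩
          have hlex2 : List.Lex (· < ·) s s'' := by
            have hpl := pairwise_lex_combs (k := k) hbase
            rw [hL, List.pairwise_append] at hpl
            exact (List.pairwise_cons.mp hpl.2.1).1 s'' hs''
          exact lex_asymm hlex2 hlex1
        -- hence t is an earlier-level extension, already in the accumulator
        have htC : t ∈ C.flatMap (ext base) := by
          have : t ∈ (combs k base).flatMap (ext base) := by
            rw [flatMap_ext_combs hbase k]; exact htmem
          rw [hL, List.flatMap_append, List.flatMap_cons] at this
          rcases List.mem_append.mp this with h | h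
          · exact h
          · rcases List.mem_append.mp h with h' | h'
            · exact absurd h' htne_ext
            · exact absurd h' htne_rest
        have hequal : PySem.Set.equal t (s ++ [b]) = true := by
          rw [PySem.Set.equal_iff]
          intro x
          rw [List.mem_orderedInsert, List.mem_append, List.mem_singleton]
          tauto
        have hany : ((C.flatMap (ext base) ++
              (p.filter (fun b => s.all (fun a => decide (a < b)))).map (fun b => s ++ [b])).any
              (fun u => PySem.Set.equal u (s ++ [b]))) = true := by
          rw [List.any_eq_true]
          exact ⟨t, List.mem_append_left _ htC, hequal⟩
        rw [hadd]
        simp only [hany, if_pos]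
        have hstep : (p ++ [b]).filter (fun b => s.all (fun a => decide (a < b)))
            = p.filter (fun b => s.all (fun a => decide (a < b))) := by
          rw [List.filter_append, List.filter_cons, hall']
          simp
        have := ihq (p ++ [b]) (by rw [hpq]; simp)
        rw [hstep] at this
        exact this

theorem innerA {base s : List String} {k : Nat}
    (hbase : base.Pairwise (· < ·))
    {C rest : List (List String)}
    (hL : combs k base = C ++ s :: rest) :
    base.foldl (fun slst b =>
        if PySem.Set.contains s b then slst
        else
          let ss := PySem.Set.add s b
          if slst.any (fun t => PySem.Set.equal t ss) then slst else slst ++ [ss])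
      (C.flatMap (ext base))
      = C.flatMap (ext base) ++ ext base s := by
  have := innerA_aux hbase hL [] base rfl
  simpa using this

theorem stepA_aux {base : List String} {k : Nat} (hbase : base.Pairwise (· < ·)) :
    ∀ (rest C : List (List String)), combs k base = C ++ rest →
    rest.foldl (fun slst s =>
        base.foldl (fun slst b =>
          if PySem.Set.contains s b then slst
          else
            let ss := PySem.Set.add s b
            if slst.any (fun t => PySem.Set.equal t ss) then slst else slst ++ [ss]) slst)
      (C.flatMap (ext base))
      = (combs k base).flatMap (ext base) := by
  intro rest
  induction rest with
  | nil => intro C hC; rw [hC]; simp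
  | cons s rest' ih =>
    intro C hC
    rw [List.foldl_cons, innerA hbase hC]
    have : C.flatMap (ext base) ++ ext base s = (C ++ [s]).flatMap (ext base) := by
      simp
    rw [this]
    exact ih (C ++ [s]) (by rw [hC]; simp)

theorem stepA_combs {base : List String} (hbase : base.Pairwise (· < ·)) (k : Nat) :
    (combs k base).foldl (fun slst s =>
        base.foldl (fun slst b =>
          if PySem.Set.contains s b then slst
          else
            let ss := PySem.Set.add s b
            if slst.any (fun t => PySem.Set.equal t ss) then slst else slst ++ [ss]) slst) []
      = combs (k + 1) base := by
  have := stepA_aux hbase (combs k base) [] rfl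
  simpa [flatMap_ext_combs hbase k] using this

-- ---------- A's recursion computes combs ----------

theorem get_setlst_rec_eq {base : List String} (hbase : base.Pairwise (· < ·)) :
    ∀ k : Nat, 2 ≤ k → get_setlst_rec (k - 2) (k : Int) base = combs k base := by
  intro k
  induction k with
  | zero => omega
  | succ k ih =>
    intro hk
    by_cases h2 : k + 1 = 2
    · have : ((k + 1 : Nat) : Int) = 2 := by omega
      rw [get_setlst_rec.eq_def, if_pos (by simp [this])]
      rw [fill_2set_eq hbase [] (by simp)]
      have : k + 1 = 2 := h2
      simp [this]
    · have hk2 : 2 ≤ k := by omega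
      rw [get_setlst_rec.eq_def]
      rw [if_neg (by simp only [beq_iff_eq]; omega)]
      have hfuel : (k + 1) - 2 = (k - 2) + 1 := by omega
      rw [hfuel]
      have harg : ((k + 1 : Nat) : Int) - 1 = (k : Int) := by push_cast; ring
      simp only [harg]
      rw [ih hk2]
      exact stepA_combs hbase k

-- ---------- B computes combs ----------

theorem pvCombos_eq_combs : ∀ (rest : List String) (k : Nat),
    pvCombos rest (k : Int) = combs k rest := by
  intro rest
  induction rest with
  | nil =>
    intro k
    cases k with
    | zero => simp [pvCombos, combs]
    | succ k =>
      rw [pvCombos, if_neg (by simp only [beq_iff_eq]; omega)]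
      rfl
  | cons x xs ih =>
    intro k
    cases k with
    | zero => simp [pvCombos, combs]
    | succ k =>
      rw [pvCombos, if_neg (by simp only [beq_iff_eq]; omega)]
      by_cases hlen : (x :: xs).length < k + 1
      · rw [if_pos (by push_cast; omega), combs_eq_nil_of_short hlen]
      · rw [if_neg (by push_cast; omega)]
        have h1 : ((k + 1 : Nat) : Int) - 1 = (k : Int) := by push_cast; ring
        rw [h1, ih k, ih (k + 1)]
        rfl

-- ---------- base facts and assembly ----------

theorem base_sorted (cdic : List (String × Int)) :
    (PySem.List.sorted (PySem.Dict.keys (PySem.Dict.ofList cdic)) (fun x => x) false).Pairwise (· < ·) := by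
  have h1 : (PySem.List.sorted (PySem.Dict.keys (PySem.Dict.ofList cdic)) (fun x => x) false).Pairwise
      (fun a b => (fun x => x) a ≤ (fun x => x) b) := PySem.List.sorted_pairwise _ _
  have h2 : (PySem.List.sorted (PySem.Dict.keys (PySem.Dict.ofList cdic)) (fun x => x) false).Nodup := by
    have hperm := PySem.List.sorted_perm (PySem.Dict.keys (PySem.Dict.ofList cdic)) (fun x : String => x) false
    exact hperm.nodup_iff.mpr (PySem.Dict.nodup_keys_ofList cdic)
  have := h1.and h2
  exact this.imp (fun h => lt_of_le_of_ne h.1 h.2)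

theorem combs_map_ofList {k : Nat} {l : List String} (hl : l.Pairwise (· < ·)) :
    (combs k l).map (fun c => PySem.Set.ofList c) = combs k l := by
  have h : (combs k l).map (fun c => PySem.Set.ofList c) = (combs k l).map id := by
    apply List.map_congr_left
    intro c hc
    exact PySem.Set.ofList_eq_self_of_nodup c ((sorted_of_mem_combs hl hc).imp (fun h => ne_of_lt h))
  rw [h, List.map_id]

-- ===== VERDICT (by name: the statement is the Claim_ definition above) =====
theorem get_setlst_spec : Claim_equal_get_setlst := by
  intro order cdic _ hpre
  have h2 : 2 ≤ order := hpre
  unfold Spec_get_setlst get_setlst get_setlst_alt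
  dsimp only
  set base := PySem.List.sorted (PySem.Dict.keys (PySem.Dict.ofList cdic)) (fun x => x) false with hb
  have hbase : base.Pairwise (· < ·) := base_sorted cdic
  have hk : order = ((order.toNat : Nat) : Int) := by omega
  have hk2 : 2 ≤ order.toNat := by omega
  have hfuel : (order - 2).toNat = order.toNat - 2 := by omega
  rw [hfuel, hk]
  simp only [Int.toNat_natCast]
  rw [pvCombos_eq_combs, combs_map_ofList hbase]
  exact get_setlst_rec_eq hbase order.toNat hk2
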